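-- pv_equiv track=rewrite | github.com/carlosfernandezcabrero/CodeSignal-solutions | growingPlant/main.py | solution
-- ===== SOURCE A (Python) =====
-- def solution(upSpeed, downSpeed, desiredHeight):
--     f = upSpeed - downSpeed
--
--     if desiredHeight <= upSpeed or desiredHeight <= f:
--         return 1
--
--     if f == 1:
--         return desiredHeight - upSpeed + 1
--
--     d = 2
--     ac = upSpeed + f
--
--     while True:
--         if ac >= desiredHeight:
--             return d
--
--         ac += f
--         d += 1
-- ===== SOURCE B (Python) =====
-- def solution(upSpeed, downSpeed, desiredHeight):
--     # Closed form: day d height = upSpeed + (d-1)*(upSpeed-downSpeed);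
--     # smallest d with height >= desiredHeight is 1 + ceil((desiredHeight-upSpeed)/growth).
--     if desiredHeight <= upSpeed:
--         return 1
--     growth = upSpeed - downSpeed
--     return 1 + -((upSpeed - desiredHeight) // growth)
-- ===== Notes on version B (the rewrite author's own statement) =====
-- stated objective: alternative
-- what changed: Replaces A's day-by-day accumulation loop with the closed form 1 + ceil((desiredHeight-upSpeed)/(upSpeed-downSpeed)).
-- intended difference: On inputs with upSpeed < desiredHeight <= upSpeed-downSpeed and positive growth (only reachable with negative downSpeed) A returns 1 although the plant's day-1 height upSpeed is still below desiredHeight; B returns the true day count 1+ceil((desiredHeight-upSpeed)/growth), which is what the problem asks for. — e.g. on solution(0, -5, 3): A returns 1, B returns 2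
-- outside the precondition, e.g. on solution(-5, -2, -4): A returns 1, B returns 1; on solution(-10, -6, -5): A returns 1, B returns 0
import Mathlib
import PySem

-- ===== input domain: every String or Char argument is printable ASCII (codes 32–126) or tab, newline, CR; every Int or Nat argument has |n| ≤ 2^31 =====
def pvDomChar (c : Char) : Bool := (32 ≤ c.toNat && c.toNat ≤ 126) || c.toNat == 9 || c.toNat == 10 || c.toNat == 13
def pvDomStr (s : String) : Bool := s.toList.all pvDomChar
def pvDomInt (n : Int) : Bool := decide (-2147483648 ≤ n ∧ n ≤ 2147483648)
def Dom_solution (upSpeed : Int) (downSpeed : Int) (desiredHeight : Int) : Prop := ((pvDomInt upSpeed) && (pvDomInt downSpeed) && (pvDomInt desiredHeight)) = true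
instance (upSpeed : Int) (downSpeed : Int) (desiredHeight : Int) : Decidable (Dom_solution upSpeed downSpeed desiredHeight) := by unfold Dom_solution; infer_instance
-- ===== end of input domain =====

-- B replaces A's day-by-day growth loop with the closed form 1 + ceil((desiredHeight-upSpeed)/growth);
-- on the corner upSpeed < desiredHeight ≤ growth (D_ below) A returns 1 though day 1 is too low, B returns the true day count.


-- ===== PORT A =====
-- A's 'while True' loop; the 'f ≤ 0' branch only makes the recursion total where the
-- Python loop diverges (outside Pre_solution) and is never reached inside Pre_.
def solutionLoop (f desiredHeight d ac : Int) : Int :=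
  if desiredHeight ≤ ac then d
  else if _h : f ≤ 0 then 0
  else solutionLoop f desiredHeight (d + 1) (ac + f)
termination_by (desiredHeight - ac).toNat
decreasing_by omega

def solution (upSpeed : Int) (downSpeed : Int) (desiredHeight : Int) : Int :=
  let f := upSpeed - downSpeed
  if desiredHeight ≤ upSpeed ∨ desiredHeight ≤ f then 1
  else if f = 1 then desiredHeight - upSpeed + 1
  else solutionLoop f desiredHeight 2 (upSpeed + f)

-- ===== PORT B =====
def solution_alt (upSpeed : Int) (downSpeed : Int) (desiredHeight : Int) : Int :=
  if desiredHeight ≤ upSpeed then 1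
  else 1 + -(PySem.Int.floordiv (upSpeed - desiredHeight) (upSpeed - downSpeed))

-- ===== PRECONDITION & SPEC =====
-- Pre_ excludes (a) non-positive growth with desiredHeight > max(upSpeed, growth), where A's
-- while-loop never terminates, and (b) non-positive growth with upSpeed < desiredHeight ≤ growth,
-- where the plant can never reach desiredHeight so no return value is correct and A's 1 is accidental.
def Pre_solution (upSpeed : Int) (downSpeed : Int) (desiredHeight : Int) : Prop :=
  desiredHeight ≤ upSpeed ∨ 1 ≤ upSpeed - downSpeed
instance (upSpeed : Int) (downSpeed : Int) (desiredHeight : Int) : Decidable (Pre_solution upSpeed downSpeed desiredHeight) := by unfold Pre_solution; infer_instance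

def pvWitness_solution : Int × Int × Int := (3, 1, 10)

-- On inputs with upSpeed < desiredHeight ≤ upSpeed-downSpeed and positive growth (only reachable with
-- negative downSpeed) A returns 1 although the plant's day-1 height upSpeed is still below desiredHeight;
-- B returns the true day count 1+ceil((desiredHeight-upSpeed)/growth), which is what the problem asks for.
def D_solution (upSpeed : Int) (downSpeed : Int) (desiredHeight : Int) : Prop :=
  upSpeed < desiredHeight ∧ desiredHeight ≤ upSpeed - downSpeed ∧ 1 ≤ upSpeed - downSpeed
instance (upSpeed : Int) (downSpeed : Int) (desiredHeight : Int) : Decidable (D_solution upSpeed downSpeed desiredHeight) := by unfold D_solution; infer_instance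

def Spec_solution (upSpeed : Int) (downSpeed : Int) (desiredHeight : Int) (out : Int) : Prop :=
  ¬ D_solution upSpeed downSpeed desiredHeight → out = solution_alt upSpeed downSpeed desiredHeight
instance (upSpeed : Int) (downSpeed : Int) (desiredHeight : Int) (out : Int) : Decidable (Spec_solution upSpeed downSpeed desiredHeight out) := by unfold Spec_solution; infer_instance

def pvDiffWitness_solution : Int × Int × Int := (0, -5, 3)
def pvDiffWitnessOut_solution : Int × Int := (1, 2)

-- ===== CLAIM =====
def Claim_unchanged_solution : Prop := ∀ (upSpeed : Int) (downSpeed : Int) (desiredHeight : Int), Dom_solution upSpeed downSpeed desiredHeight → Pre_solution upSpeed downSpeed desiredHeight → Spec_solution upSpeed downSpeed desiredHeight (solution upSpeed downSpeed desiredHeight)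
def Claim_changed_solution : Prop := Dom_solution (pvDiffWitness_solution.1) (pvDiffWitness_solution.2.1) (pvDiffWitness_solution.2.2) ∧ Pre_solution (pvDiffWitness_solution.1) (pvDiffWitness_solution.2.1) (pvDiffWitness_solution.2.2) ∧ D_solution (pvDiffWitness_solution.1) (pvDiffWitness_solution.2.1) (pvDiffWitness_solution.2.2) ∧ solution (pvDiffWitness_solution.1) (pvDiffWitness_solution.2.1) (pvDiffWitness_solution.2.2) = pvDiffWitnessOut_solution.1 ∧ solution_alt (pvDiffWitness_solution.1) (pvDiffWitness_solution.2.1) (pvDiffWitness_solution.2.2) = pvDiffWitnessOut_solution.2 ∧ pvDiffWitnessOut_solution.1 ≠ pvDiffWitnessOut_solution.2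
def Claim_exact_solution : Prop := ∀ (upSpeed : Int) (downSpeed : Int) (desiredHeight : Int), Dom_solution upSpeed downSpeed desiredHeight → Pre_solution upSpeed downSpeed desiredHeight → D_solution upSpeed downSpeed desiredHeight → solution upSpeed downSpeed desiredHeight ≠ solution_alt upSpeed downSpeed desiredHeight

-- ===== LEMMAS AND PROOFS =====
-- A's loop computes d + ceil((desiredHeight - ac)/f) when growth is positive and ac is still short.
theorem solutionLoop_eq (f desiredHeight : Int) (hf : 1 ≤ f) :
    ∀ ac d : Int, ac < desiredHeight →
      solutionLoop f desiredHeight d ac = d - PySem.Int.floordiv (ac - desiredHeight) f := by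
  intro ac d hlt
  induction hn : (desiredHeight - ac).toNat using Nat.strong_induction_on generalizing ac d with
  | _ n ih =>
    rw [solutionLoop]
    have h1 : ¬ desiredHeight ≤ ac := by omega
    have h2 : ¬ f ≤ 0 := by omega
    rw [if_neg h1, dif_neg h2]
    by_cases hdone : desiredHeight ≤ ac + f
    · rw [solutionLoop]
      simp only [hdone, if_true]
      have : PySem.Int.floordiv (ac - desiredHeight) f = -1 := by
        rw [PySem.Int.floordiv_eq_iff_of_pos (by omega)] <;> omega
      omega
    · rw [ih ((desiredHeight - (ac + f)).toNat) (by omega) (ac + f) (d + 1) (by omega) rfl]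
      have step : PySem.Int.floordiv (ac + f - desiredHeight) f
          = PySem.Int.floordiv (ac - desiredHeight) f + 1 := by
        have h := PySem.Int.floordiv_mul_add_mod (ac - desiredHeight) f
        have hm := PySem.Int.mod_nonneg (ac - desiredHeight) (show (0:Int) < f by omega)
        have hm2 := PySem.Int.mod_lt (ac - desiredHeight) (show (0:Int) < f by omega)
        rw [PySem.Int.floordiv_eq_iff_of_pos (by omega)]
        constructor <;> nlinarith
      omega

theorem solution_spec : Claim_unchanged_solution := by
  intro u d h _ hpre hnd
  unfold D_solution at hnd
  unfold Pre_solution at hpre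
  unfold solution solution_alt
  simp only []
  by_cases h1 : h ≤ u
  · have : h ≤ u ∨ h ≤ u - d := Or.inl h1
    simp [h1]
  · -- h > u; Pre gives 1 ≤ u - d; ¬D gives u - d < h
    have hf : 1 ≤ u - d := by omega
    have h2 : ¬ h ≤ u - d := by omega
    have hor : ¬ (h ≤ u ∨ h ≤ u - d) := by omega
    simp only [h1, h2, if_false, or_false]
    by_cases hone : u - d = 1
    · have : PySem.Int.floordiv (u - h) (u - d) = u - h := by
        rw [hone, PySem.Int.floordiv_eq_iff_of_pos (by omega)] <;> omega
      rw [if_pos hone, this]; ring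
    · rw [if_neg hone]
      by_cases hdone : h ≤ u + (u - d)
      · rw [solutionLoop, if_pos hdone]
        have : PySem.Int.floordiv (u - h) (u - d) = -1 := by
          rw [PySem.Int.floordiv_eq_iff_of_pos (by omega)] <;> omega
        rw [this]; ring
      · rw [solutionLoop_eq (u - d) h hf (u + (u - d)) 2 (by omega)]
        have step : PySem.Int.floordiv (u + (u - d) - h) (u - d)
            = PySem.Int.floordiv (u - h) (u - d) + 1 := by
          have hh := PySem.Int.floordiv_mul_add_mod (u - h) (u - d)
          have hm := PySem.Int.mod_nonneg (u - h) (show (0:Int) < u - d by omega)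
          have hm2 := PySem.Int.mod_lt (u - h) (show (0:Int) < u - d by omega)
          rw [PySem.Int.floordiv_eq_iff_of_pos (by omega)]
          constructor <;> nlinarith
        rw [step]; ring

theorem solution_changed : Claim_changed_solution := by unfold Claim_changed_solution; decide

theorem solution_tight : Claim_exact_solution := by
  intro u d h _ _ hD
  obtain ⟨h1, h2, hf⟩ := hD
  have hA : solution u d h = 1 := by
    unfold solution; simp only []
    have : h ≤ u ∨ h ≤ u - d := Or.inr h2
    rw [if_pos this]
  have hB : 2 ≤ solution_alt u d h := by
    unfold solution_alt
    rw [if_neg (by omega)]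
    have : PySem.Int.floordiv (u - h) (u - d) ≤ -1 := by
      have hh := PySem.Int.floordiv_mul_add_mod (u - h) (u - d)
      have hm := PySem.Int.mod_nonneg (u - h) (show (0:Int) < u - d by omega)
      have hm2 := PySem.Int.mod_lt (u - h) (show (0:Int) < u - d by omega)
      nlinarith
    omega
  omega
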